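-- pv_equiv track=rewrite | github.com/fishtrap2/cka-coach-phase3 | src/dashboard_presenters.py | _normalize_local_node_name
-- ===== SOURCE A (Python) =====
-- from typing import Any, Dict, List
--
-- def _normalize_local_node_name(runtime: Dict[str, Any], parsed_nodes: List[Dict[str, Any]]) -> str:
--     hostname = (runtime.get("hostname", "") or "").strip()
--     if not hostname:
--         return ""
--     node_names = [node.get("name", "") for node in parsed_nodes if node.get("name")]
--     if hostname in node_names:
--         return hostname
--     for node_name in node_names:
--         if hostname.startswith(node_name) or node_name.startswith(hostname):
--             return node_name
--     return hostname
-- ===== SOURCE B (Python) =====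
-- def _normalize_local_node_name(runtime, parsed_nodes):
--     hostname = (runtime.get("hostname", "") or "").strip()
--     if not hostname:
--         return ""
--     first_prefix = None
--     for node in parsed_nodes:
--         name = node.get("name", "")
--         if not name:
--             continue
--         if name == hostname:
--             return hostname
--         if first_prefix is None and (hostname.startswith(name) or name.startswith(hostname)):
--             first_prefix = name
--     return first_prefix if first_prefix is not None else hostname
-- ===== Notes on version B (the rewrite author's own statement) =====
-- stated objective: simpler
-- what changed: B replaces A's three passes over the node list (build a filtered name list, membership test for an exact match, then a prefix-scan loop) with one pass that returns immediately on an exact match and remembers only the first prefix-compatible name, without materialising the name list.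
import Mathlib
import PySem

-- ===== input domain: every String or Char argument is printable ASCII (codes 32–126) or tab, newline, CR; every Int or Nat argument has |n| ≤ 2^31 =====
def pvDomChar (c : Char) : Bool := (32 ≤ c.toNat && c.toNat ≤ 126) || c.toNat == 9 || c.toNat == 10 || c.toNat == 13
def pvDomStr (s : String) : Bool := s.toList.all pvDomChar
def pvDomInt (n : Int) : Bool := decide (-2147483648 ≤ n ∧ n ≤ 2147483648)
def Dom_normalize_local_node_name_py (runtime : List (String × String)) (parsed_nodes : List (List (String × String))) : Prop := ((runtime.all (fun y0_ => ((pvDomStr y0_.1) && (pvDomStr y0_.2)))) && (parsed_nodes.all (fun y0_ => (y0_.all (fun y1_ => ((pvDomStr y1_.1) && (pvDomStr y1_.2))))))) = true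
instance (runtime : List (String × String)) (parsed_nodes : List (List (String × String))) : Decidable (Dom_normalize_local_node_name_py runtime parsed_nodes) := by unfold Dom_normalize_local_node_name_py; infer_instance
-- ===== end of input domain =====

-- B makes a single pass over parsed_nodes (exact match returns at once, first prefix match is
-- remembered) instead of A's three passes (build name list, membership test, prefix scan). Same values.

-- ===== PORT A =====
def normalize_local_node_name_py (runtime : List (String × String)) (parsed_nodes : List (List (String × String))) : String :=
  let h0 := (PySem.Dict.ofList runtime).getD "hostname" ""
  let hostname := PySem.Str.strip (if h0 = "" then "" else h0)
  if hostname = "" then ""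
  else
    let node_names := (parsed_nodes.filter
        (fun node => !((PySem.Dict.ofList node).getD "name" "" == ""))).map
        (fun node => (PySem.Dict.ofList node).getD "name" "")
    if hostname ∈ node_names then hostname
    else
      match node_names.find?
          (fun nn => PySem.Str.startswith hostname nn || PySem.Str.startswith nn hostname) with
      | some nn => nn
      | none => hostname

-- ===== PORT B =====
def pvAltLoop (hostname : String) (nodes : List (List (String × String))) (first_prefix : Option String) : String :=
  match nodes with
  | [] => match first_prefix with | some f => f | none => hostname
  | node :: rest =>
    let name := (PySem.Dict.ofList node).getD "name" ""
    if name = "" then pvAltLoop hostname rest first_prefix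
    else if name = hostname then hostname
    else if first_prefix.isNone &&
        (PySem.Str.startswith hostname name || PySem.Str.startswith name hostname) then
      pvAltLoop hostname rest (some name)
    else pvAltLoop hostname rest first_prefix

def normalize_local_node_name_py_alt (runtime : List (String × String)) (parsed_nodes : List (List (String × String))) : String :=
  let h0 := (PySem.Dict.ofList runtime).getD "hostname" ""
  let hostname := PySem.Str.strip (if h0 = "" then "" else h0)
  if hostname = "" then ""
  else pvAltLoop hostname parsed_nodes none

-- ===== PRECONDITION & SPEC =====
def Spec_normalize_local_node_name_py (runtime : List (String × String)) (parsed_nodes : List (List (String × String))) (out : String) : Prop := out = normalize_local_node_name_py_alt runtime parsed_nodes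
instance (runtime : List (String × String)) (parsed_nodes : List (List (String × String))) (out : String) : Decidable (Spec_normalize_local_node_name_py runtime parsed_nodes out) := by unfold Spec_normalize_local_node_name_py; infer_instance

-- ===== CLAIM (what is proved, stated in full; the proofs are below) =====
def Claim_equal_normalize_local_node_name_py : Prop := ∀ (runtime : List (String × String)) (parsed_nodes : List (List (String × String))), Dom_normalize_local_node_name_py runtime parsed_nodes → Spec_normalize_local_node_name_py runtime parsed_nodes (normalize_local_node_name_py runtime parsed_nodes)

-- ===== LEMMAS AND PROOFS =====
-- B's loop, restated over the list of (nonempty) names it actually inspects.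
def pvBNames (hostname : String) (names : List String) (fp : Option String) : String :=
  match names with
  | [] => match fp with | some f => f | none => hostname
  | n :: rest =>
    if n = hostname then hostname
    else if fp.isNone && (PySem.Str.startswith hostname n || PySem.Str.startswith n hostname) then
      pvBNames hostname rest (some n)
    else pvBNames hostname rest fp

theorem pvAltLoop_eq_bNames (hostname : String) (nodes : List (List (String × String))) (fp : Option String) :
    pvAltLoop hostname nodes fp =
      pvBNames hostname
        ((nodes.filter (fun node => !((PySem.Dict.ofList node).getD "name" "" == ""))).map
          (fun node => (PySem.Dict.ofList node).getD "name" "")) fp := by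
  induction nodes generalizing fp with
  | nil => rfl
  | cons node rest ih =>
    by_cases hempty : (PySem.Dict.ofList node).getD "name" "" = ""
    · simp only [pvAltLoop, List.filter_cons, hempty, beq_self_eq_true,
        Bool.not_true, Bool.false_eq_true, if_false, if_true, ih]
    · simp only [pvAltLoop, if_neg hempty, List.filter_cons,
        (by simp [hempty] : (!((PySem.Dict.ofList node).getD "name" "" == "")) = true),
        if_true, List.map_cons, pvBNames, ih]

theorem pvBNames_eq (hostname : String) (names : List String) (fp : Option String) :
    pvBNames hostname names fp =
      (if hostname ∈ names then hostname
       else match fp with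
         | some f => f
         | none =>
           match names.find?
               (fun nn => PySem.Str.startswith hostname nn || PySem.Str.startswith nn hostname) with
           | some nn => nn
           | none => hostname) := by
  induction names generalizing fp with
  | nil => cases fp <;> rfl
  | cons n rest ih =>
    by_cases hh : n = hostname
    · subst hh
      simp only [pvBNames, List.mem_cons, true_or, if_true]
    · have hmem : (hostname ∈ n :: rest) = (hostname ∈ rest) := by
        simp [List.mem_cons, Ne.symm hh]
      cases fp with
      | some f =>
        simp only [pvBNames, if_neg hh, Option.isNone_some, Bool.false_and, Bool.false_eq_true,
          if_false, ih (some f), hmem]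
      | none =>
        by_cases hp : (PySem.Str.startswith hostname n || PySem.Str.startswith n hostname) = true
        · rw [List.find?_cons_of_pos
            (p := fun nn => PySem.Str.startswith hostname nn || PySem.Str.startswith nn hostname) hp]
          simp only [pvBNames, if_neg hh, Option.isNone_none, Bool.true_and, hp, if_true,
            ih (some n), hmem]
        · rw [List.find?_cons_of_neg
            (p := fun nn => PySem.Str.startswith hostname nn || PySem.Str.startswith nn hostname)
            (by simpa using hp)]
          simp only [pvBNames, if_neg hh, Option.isNone_none, Bool.true_and, hp,
            Bool.false_eq_true, if_false, ih none, hmem]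

-- ===== VERDICT (by name: the statement is the Claim_ definition above) =====
theorem normalize_local_node_name_py_spec : Claim_equal_normalize_local_node_name_py := by
  intro runtime parsed_nodes _
  unfold Spec_normalize_local_node_name_py
  simp only [normalize_local_node_name_py, normalize_local_node_name_py_alt,
    pvAltLoop_eq_bNames, pvBNames_eq]
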